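-- pv_equiv track=rewrite | github.com/JoshHumpherey/advent-of-code | 2018/day7/solution.py | get_next_idx
-- ===== SOURCE A (Python) =====
-- from typing import Dict, List, Tuple
--
-- def get_next_idx(queue: List[int], rev_graph: Dict, processed: set) -> int:
--     queue = sorted(queue)
--     for i in range(len(queue)):
--         potential_node = queue[i]
--         if potential_node not in rev_graph:
--             return i
--         else:
--             valid = True
--             for n in rev_graph[potential_node]:
--                 if n not in processed:
--                     valid = False
--                     break
--             if valid:
--                 return i
--     return -1
-- ===== SOURCE B (Python) =====
-- def get_next_idx(queue, rev_graph, processed):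
--     def valid(node):
--         return node not in rev_graph or all(n in processed for n in rev_graph[node])
--     candidates = [x for x in queue if valid(x)]
--     if not candidates:
--         return -1
--     v = min(candidates)
--     return sum(1 for x in queue if x < v)
-- ===== Notes on version B (the rewrite author's own statement) =====
-- stated objective: alternative
-- what changed: Replaces sort-then-scan with a select-minimum pass: B takes the minimum valid node V and returns the count of queue elements strictly below V (its rank in sorted order), avoiding the sort entirely.
import Mathlib
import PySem

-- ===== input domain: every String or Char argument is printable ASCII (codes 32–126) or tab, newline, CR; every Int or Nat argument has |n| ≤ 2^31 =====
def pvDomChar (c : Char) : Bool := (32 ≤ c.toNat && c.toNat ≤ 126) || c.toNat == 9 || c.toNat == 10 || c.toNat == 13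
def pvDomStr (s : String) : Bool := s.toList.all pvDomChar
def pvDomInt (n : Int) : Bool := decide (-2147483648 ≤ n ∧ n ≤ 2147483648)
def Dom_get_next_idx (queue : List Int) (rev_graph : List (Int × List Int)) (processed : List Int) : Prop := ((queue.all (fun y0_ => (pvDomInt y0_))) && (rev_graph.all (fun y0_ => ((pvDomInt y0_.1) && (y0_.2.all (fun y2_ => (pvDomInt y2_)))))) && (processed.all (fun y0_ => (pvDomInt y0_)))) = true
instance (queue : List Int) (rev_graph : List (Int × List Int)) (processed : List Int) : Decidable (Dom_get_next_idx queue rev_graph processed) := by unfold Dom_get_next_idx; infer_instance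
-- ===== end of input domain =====

-- B replaces A's sort-then-scan by selecting the minimum valid node and counting strictly
-- smaller queue elements (its rank = its index in sorted order); alternative algorithm, same cost class.

-- ===== PORT A =====
-- inner loop 'valid = True; for n in ...: if n not in processed: valid = False; break'
def pvAValid (processed : List Int) : List Int → Bool
  | [] => true
  | n :: rest => if !(processed.contains n) then false else pvAValid processed rest

-- 'for i in range(len(queue)): potential_node = queue[i]; ...' over the sorted copy, carrying i
def pvALoop (rev_graph : List (Int × List Int)) (processed : List Int) : List Int → Int → Int
  | [], _ => -1
  | x :: rest, i =>
    match (PySem.Dict.mk rev_graph).get? x with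
    | none => i
    | some deps => if pvAValid processed deps then i else pvALoop rev_graph processed rest (i + 1)

def get_next_idx (queue : List Int) (rev_graph : List (Int × List Int)) (processed : List Int) : Int :=
  pvALoop rev_graph processed (PySem.List.sorted queue (fun x => x) false) 0

-- ===== PORT B =====
-- 'node not in rev_graph or all(n in processed for n in rev_graph[node])'
def pvBValid (rev_graph : List (Int × List Int)) (processed : List Int) (x : Int) : Bool :=
  match (PySem.Dict.mk rev_graph).get? x with
  | none => true
  | some deps => deps.all (fun n => processed.contains n)

def get_next_idx_alt (queue : List Int) (rev_graph : List (Int × List Int)) (processed : List Int) : Int :=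
  let candidates := queue.filter (pvBValid rev_graph processed)
  match PySem.List.min? candidates (fun x => x) with
  | none => -1
  | some v => (queue.countP (fun x => decide (x < v)) : Int)

-- ===== PRECONDITION & SPEC =====
def Spec_get_next_idx (queue : List Int) (rev_graph : List (Int × List Int)) (processed : List Int) (out : Int) : Prop := out = get_next_idx_alt queue rev_graph processed
instance (queue : List Int) (rev_graph : List (Int × List Int)) (processed : List Int) (out : Int) : Decidable (Spec_get_next_idx queue rev_graph processed out) := by unfold Spec_get_next_idx; infer_instance

-- ===== CLAIM (what is proved, stated in full; the proofs are below) =====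
def Claim_equal_get_next_idx : Prop := ∀ (queue : List Int) (rev_graph : List (Int × List Int)) (processed : List Int), Dom_get_next_idx queue rev_graph processed → Spec_get_next_idx queue rev_graph processed (get_next_idx queue rev_graph processed)

-- ===== LEMMAS AND PROOFS =====

theorem pvAValid_eq_all (processed : List Int) (deps : List Int) :
    pvAValid processed deps = deps.all (fun n => processed.contains n) := by
  induction deps with
  | nil => rfl
  | cons n rest ih => cases h : processed.contains n <;> simp [pvAValid, h, ih]

-- A's scan at position i gives "valid at x" exactly pvBValid x
theorem pvALoop_cons (rev_graph : List (Int × List Int)) (processed : List Int)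
    (x : Int) (rest : List Int) (i : Int) :
    pvALoop rev_graph processed (x :: rest) i =
      if pvBValid rev_graph processed x then i else pvALoop rev_graph processed rest (i + 1) := by
  cases hg : (PySem.Dict.mk rev_graph).get? x <;>
    simp [pvALoop, pvBValid, pvAValid_eq_all, hg]

-- main invariant: on a ≤-sorted list, A's scan returns the rank of the head of the valid filter
theorem pvALoop_rank (rev_graph : List (Int × List Int)) (processed : List Int)
    (qs : List Int) (hs : qs.Pairwise (· ≤ ·)) (k : Int) :
    pvALoop rev_graph processed qs k =
      match (qs.filter (pvBValid rev_graph processed)).head? with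
      | none => -1
      | some v => k + (qs.countP (fun x => decide (x < v)) : Int) := by
  induction qs generalizing k with
  | nil => rfl
  | cons x rest ih =>
    rcases List.pairwise_cons.mp hs with ⟨hx, hrest⟩
    rw [pvALoop_cons]
    by_cases hp : pvBValid rev_graph processed x
    · simp only [hp, if_true, List.filter_cons_of_pos hp, List.head?_cons]
      have h0 : rest.countP (fun y => decide (y < x)) = 0 := by
        rw [List.countP_eq_zero]
        intro y hy
        simp only [decide_eq_true_eq]
        exact not_lt.mpr (hx y hy)
      simp [h0]
    · simp only [hp, List.filter_cons_of_neg hp]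
      rw [ih hrest]
      cases hhd : (rest.filter (pvBValid rev_graph processed)).head? with
      | none => rfl
      | some v =>
        have hvmem : v ∈ rest.filter (pvBValid rev_graph processed) := List.mem_of_mem_head? hhd
        have hv : v ∈ rest ∧ pvBValid rev_graph processed v := by
          simpa using List.mem_filter.mp hvmem
        have hxv : x < v := by
          rcases lt_or_eq_of_le (hx v hv.1) with h | h
          · exact h
          · exact absurd (h ▸ hv.2) hp
        simp only [List.countP_cons, decide_eq_true_eq]
        simp [hxv]
        ring

-- B's min over the unsorted candidates is the head of the sorted candidates
theorem min?_eq_head_sorted_filter (queue : List Int) (p : Int → Bool) :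
    PySem.List.min? (queue.filter p) (fun x => x) =
      ((PySem.List.sorted queue (fun x => x) false).filter p).head? := by
  have hperm : ((PySem.List.sorted queue (fun x => x) false).filter p).Perm (queue.filter p) :=
    (PySem.List.sorted_perm queue (fun x => x) false).filter p
  cases hmin : PySem.List.min? (queue.filter p) (fun x => x) with
  | none =>
    have : queue.filter p = [] := (PySem.List.min?_eq_none_iff _ _).mp hmin
    have : ((PySem.List.sorted queue (fun x => x) false).filter p) = [] :=
      List.Perm.eq_nil (this ▸ hperm)
    simp [this]
  | some m =>
    have hmmem : m ∈ queue.filter p := PySem.List.min?_mem hmin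
    have hmmin : ∀ y ∈ queue.filter p, m ≤ y := by
      intro y hy; exact PySem.List.min?_isMin hmin y hy
    cases hhd : ((PySem.List.sorted queue (fun x => x) false).filter p).head? with
    | none =>
      have hnil : ((PySem.List.sorted queue (fun x => x) false).filter p) = [] :=
        List.head?_eq_none_iff.mp hhd
      exact absurd (hperm.mem_iff.mpr hmmem) (by simp [hnil])
    | some v =>
      have hvmem : v ∈ queue.filter p :=
        hperm.mem_iff.mp (List.mem_of_mem_head? hhd)
      -- v is ≤ every element of the sorted filtered list, hence ≤ m
      have hsorted : ((PySem.List.sorted queue (fun x => x) false).filter p).Pairwise (· ≤ ·) :=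
        (PySem.List.sorted_pairwise queue (fun x => x)).filter p
      obtain ⟨t, ht⟩ : ∃ t, (PySem.List.sorted queue (fun x => x) false).filter p = v :: t := by
        cases hl : (PySem.List.sorted queue (fun x => x) false).filter p with
        | nil => rw [hl] at hhd; simp at hhd
        | cons a t => rw [hl] at hhd; simp at hhd; exact ⟨t, by rw [hhd]⟩
      have hvle : ∀ y ∈ queue.filter p, v ≤ y := by
        intro y hy
        have : y ∈ v :: t := ht ▸ hperm.mem_iff.mpr hy
        rcases List.mem_cons.mp this with h | hyt
        · exact h.ge
        · exact (List.pairwise_cons.mp (ht ▸ hsorted)).1 y hyt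
      have : m = v := le_antisymm (hmmin v hvmem) (hvle m hmmem)
      simp [this]

theorem countP_sorted (queue : List Int) (q : Int → Bool) :
    (PySem.List.sorted queue (fun x => x) false).countP q = queue.countP q :=
  (PySem.List.sorted_perm queue (fun x => x) false).countP_eq q

-- ===== VERDICT (by name: the statement is the Claim_ definition above) =====
theorem get_next_idx_spec : Claim_equal_get_next_idx := by
  intro queue rev_graph processed _
  simp only [Spec_get_next_idx, get_next_idx, get_next_idx_alt]
  rw [pvALoop_rank rev_graph processed _ (PySem.List.sorted_pairwise queue (fun x => x)) 0,
      min?_eq_head_sorted_filter queue (pvBValid rev_graph processed)]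
  cases ((PySem.List.sorted queue (fun x => x) false).filter (pvBValid rev_graph processed)).head? with
  | none => rfl
  | some v => simp [countP_sorted]
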